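-- pv_equiv track=rewrite | github.com/relidaar/ComputingCourse | PrinciplesOfComputing/game_2048.py | merge_equal
-- ===== SOURCE A (Python) =====
-- def merge_equal(line):
--     '''
--     Function that merges and doubles identical adjacent numbers (if not zeros).
--     :param line: collection of numbers
--     :return: arranged line with merged identical numbers
--     '''
--     temp = []
--     size = len(line)
--     index = 0
--     while index < size:
--         current = line[index]
--         if index + 1 >= size:
--             temp.append(current)
--             break
--         if current == line[index + 1] and current != 0:
--             temp.append(current * 2)
--             index += 2
--         else:
--             temp.append(current)
--             index += 1
--     return temp
-- ===== SOURCE B (Python) =====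
-- def merge_equal(line):
--     result = []
--     has_prev = False
--     pending = 0
--     for x in line:
--         if has_prev and pending == x and x != 0:
--             result.append(2 * x)
--             has_prev = False
--         else:
--             if has_prev:
--                 result.append(pending)
--             pending = x
--             has_prev = True
--     if has_prev:
--         result.append(pending)
--     return result
-- ===== Notes on version B (the rewrite author's own statement) =====
-- stated objective: alternative
-- what changed: Replaces A's index-by-2 while loop with line[index+1] lookahead by a single state-carry for-loop over the elements that keeps a pending previous value and a has_prev flag, flushed after the loop.
import Mathlib
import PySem

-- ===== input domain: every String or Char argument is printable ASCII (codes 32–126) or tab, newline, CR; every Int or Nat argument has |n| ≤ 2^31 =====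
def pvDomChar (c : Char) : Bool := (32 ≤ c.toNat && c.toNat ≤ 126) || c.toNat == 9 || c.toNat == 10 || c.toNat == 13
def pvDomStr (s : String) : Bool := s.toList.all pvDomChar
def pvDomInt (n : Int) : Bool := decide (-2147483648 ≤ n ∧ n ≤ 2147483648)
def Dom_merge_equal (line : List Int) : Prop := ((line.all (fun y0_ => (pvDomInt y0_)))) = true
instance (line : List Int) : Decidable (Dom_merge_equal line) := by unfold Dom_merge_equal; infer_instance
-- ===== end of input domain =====

-- B replaces A's index-by-2 while loop (with line[index+1] lookahead) by a single
-- state-carry pass with a pending value and a has_prev flag; same values, same cost.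

-- ===== PORT A =====
-- A's while loop reads line[index]; if index+1 >= size it appends and breaks;
-- else merges with line[index+1] (advancing by 2) or appends (advancing by 1).
-- Ported as recursion on the suffix from index: [], [x], x :: y :: rest.
def merge_equal (line : List Int) : List Int :=
  match line with
  | [] => []
  | [x] => [x]
  | x :: y :: rest =>
      if x = y ∧ x ≠ 0 then x * 2 :: merge_equal rest
      else x :: merge_equal (y :: rest)

-- ===== PORT B =====
-- step of B's for-loop: state = (result, has_prev, pending)
def bStep (s : List Int × Bool × Int) (x : Int) : List Int × Bool × Int :=
  if s.2.1 = true ∧ s.2.2 = x ∧ x ≠ 0 then (s.1 ++ [2 * x], false, s.2.2)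
  else ((if s.2.1 then s.1 ++ [s.2.2] else s.1), true, x)

def merge_equal_alt (line : List Int) : List Int :=
  let s := line.foldl bStep ([], false, 0)
  if s.2.1 then s.1 ++ [s.2.2] else s.1

-- ===== PRECONDITION & SPEC =====
def Spec_merge_equal (line : List Int) (out : List Int) : Prop := out = merge_equal_alt line
instance (line : List Int) (out : List Int) : Decidable (Spec_merge_equal line out) := by unfold Spec_merge_equal; infer_instance

-- ===== CLAIM (what is proved, stated in full; the proofs are below) =====
def Claim_equal_merge_equal : Prop := ∀ (line : List Int), Dom_merge_equal line → Spec_merge_equal line (merge_equal line)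

-- ===== LEMMAS AND PROOFS =====

-- flush of B's final state
def bFlush (s : List Int × Bool × Int) : List Int :=
  if s.2.1 then s.1 ++ [s.2.2] else s.1

-- loop invariant: folding from (res, false, _) yields res ++ merge of the rest;
-- folding from (res, true, pend) yields res ++ merge of (pend :: rest)
theorem bFold_inv (l : List Int) :
    (∀ (res : List Int) (pend : Int),
        bFlush (l.foldl bStep (res, false, pend)) = res ++ merge_equal l) ∧
    (∀ (res : List Int) (pend : Int),
        bFlush (l.foldl bStep (res, true, pend)) = res ++ merge_equal (pend :: l)) := by
  induction l with
  | nil => constructor <;> intro res pend <;> simp [bFlush, merge_equal]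
  | cons x rest ih =>
    obtain ⟨ih0, ih1⟩ := ih
    constructor
    · intro res pend
      simp only [List.foldl_cons, bStep]
      simp only [show ¬((false : Bool) = true ∧ pend = x ∧ x ≠ 0) by simp, if_false]
      simpa using ih1 res x
    · intro res pend
      simp only [List.foldl_cons, bStep]
      by_cases h : pend = x ∧ x ≠ 0
      · rw [if_pos (by simpa using h)]
        rw [ih0 (res ++ [2 * x]) pend]
        obtain ⟨rfl, hx⟩ := h
        simp [merge_equal, hx, mul_comm]
      · rw [if_neg (by simpa using h)]
        simp only [reduceIte]
        rw [ih1 (res ++ [pend]) x]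
        have h' : ¬(pend = x ∧ pend ≠ 0) := fun hc => h ⟨hc.1, hc.1 ▸ hc.2⟩
        simp [merge_equal, h']

-- ===== VERDICT (by name: the statement is the Claim_ definition above) =====
theorem merge_equal_spec : Claim_equal_merge_equal := by
  intro line _
  show merge_equal line = merge_equal_alt line
  have := (bFold_inv line).1 [] 0
  simpa [merge_equal_alt, bFlush] using this.symm
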